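-- pv_equiv track=rewrite | github.com/tjouliab/advent-of-code | aot-2022/9-2022/9-2022.py | calculate_grid_height_width
-- ===== SOURCE A (Python) =====
-- def calculate_grid_height_width(lines):
--     current_height = 0
--     min_height = 0
--     max_height = 0
--
--     current_width = 0
--     min_width = 0
--     max_width = 0
--
--     for line in lines:
--         [direction, value] = line
--         match direction:
--             case 'U':
--                 current_height -= int(value)
--             case 'D':
--                 current_height += int(value)
--             case 'R':
--                 current_width += int(value)
--             case 'L':
--                 current_width -= int(value)
--
--         min_height = min(min_height, current_height)
--         max_height = max(max_height, current_height)
--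
--         min_width = min(min_width, current_width)
--         max_width = max(max_width, current_width)
--
--     grid_height = max_height - min_height + 1
--     grid_width = max_width - min_width + 1
--     starting_height = - min_height
--     starting_width = - min_width
--
--     return [grid_height, grid_width, starting_height, starting_width]
-- ===== SOURCE B (Python) =====
-- def calculate_grid_height_width(lines):
--     # B: two-phase decomposition — map moves to (dh, dw) deltas, build the
--     # cumulative position trajectories seeded with 0, then take min/max once.
--     deltas = []
--     for line in lines:
--         [direction, value] = line
--         dh = 0
--         dw = 0
--         if direction == 'U':
--             dh = -int(value)
--         elif direction == 'D':
--             dh = int(value)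
--         elif direction == 'R':
--             dw = int(value)
--         elif direction == 'L':
--             dw = -int(value)
--         deltas.append((dh, dw))
--
--     heights = [0]
--     h = 0
--     for (dh, _) in deltas:
--         h += dh
--         heights.append(h)
--
--     widths = [0]
--     w = 0
--     for (_, dw) in deltas:
--         w += dw
--         widths.append(w)
--
--     min_h, max_h = min(heights), max(heights)
--     min_w, max_w = min(widths), max(widths)
--     return [max_h - min_h + 1, max_w - min_w + 1, -min_h, -min_w]
-- ===== Notes on version B (the rewrite author's own statement) =====
-- stated objective: alternative
-- what changed: Replaced A's single loop carrying six running accumulators (current/min/max for height and width) by a two-phase decomposition: map each move to a signed (dh, dw) delta, build the cumulative position trajectories seeded with 0, then take min/max over each trajectory once at the end.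
import Mathlib
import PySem

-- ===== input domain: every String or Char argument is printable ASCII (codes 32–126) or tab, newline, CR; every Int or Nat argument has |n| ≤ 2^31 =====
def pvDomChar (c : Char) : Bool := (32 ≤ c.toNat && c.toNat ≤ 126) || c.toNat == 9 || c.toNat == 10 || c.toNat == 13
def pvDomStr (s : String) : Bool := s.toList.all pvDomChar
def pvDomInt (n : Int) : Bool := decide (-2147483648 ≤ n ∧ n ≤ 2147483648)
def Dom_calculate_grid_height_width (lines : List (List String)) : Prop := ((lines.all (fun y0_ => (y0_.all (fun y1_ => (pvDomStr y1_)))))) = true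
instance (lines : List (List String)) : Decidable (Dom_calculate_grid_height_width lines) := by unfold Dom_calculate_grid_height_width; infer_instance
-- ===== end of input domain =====

-- B replaces A's single six-accumulator running-min/max loop by a two-phase decomposition
-- (map moves to signed deltas, build the cumulative trajectories, then min/max once); same cost, objective: alternative.

-- ===== PORT A =====
-- one iteration of A's loop over the state (current_height, min_height, max_height, current_width, min_width, max_width)
def pvStepA (st : Int × Int × Int × Int × Int × Int) (line : List String) :
    Int × Int × Int × Int × Int × Int :=
  match st, line with
  | (ch, mnh, mxh, cw, mnw, mxw), [direction, value] =>
    -- match direction: the four cases update one coordinate; int(value) ported as (ofStr? value).getD 0, Pre_ excludes the none case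
    let p : Int × Int :=
      if direction = "U" then (ch - (PySem.Int.ofStr? value).getD 0, cw)
      else if direction = "D" then (ch + (PySem.Int.ofStr? value).getD 0, cw)
      else if direction = "R" then (ch, cw + (PySem.Int.ofStr? value).getD 0)
      else if direction = "L" then (ch, cw - (PySem.Int.ofStr? value).getD 0)
      else (ch, cw)
    (p.1, min mnh p.1, max mxh p.1, p.2, min mnw p.2, max mxw p.2)
  | st, _ => st  -- '[direction, value] = line' raises here; excluded by Pre_

def calculate_grid_height_width (lines : List (List String)) : List Int :=
  match lines.foldl pvStepA (0, 0, 0, 0, 0, 0) with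
  | (_, mnh, mxh, _, mnw, mxw) => [mxh - mnh + 1, mxw - mnw + 1, -mnh, -mnw]

-- ===== PORT B =====
-- per-line (dh, dw) delta; int(value) ported as (ofStr? value).getD 0, Pre_ excludes the none case
def pvDelta (line : List String) : Int × Int :=
  match line with
  | [direction, value] =>
    if direction = "U" then (-(PySem.Int.ofStr? value).getD 0, 0)
    else if direction = "D" then ((PySem.Int.ofStr? value).getD 0, 0)
    else if direction = "R" then (0, (PySem.Int.ofStr? value).getD 0)
    else if direction = "L" then (0, -(PySem.Int.ofStr? value).getD 0)
    else (0, 0)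
  | _ => (0, 0)  -- unpack raises here; excluded by Pre_

-- Source B's trajectory loop: running position appended to the list seeded with [0]
def pvTraj (ds : List Int) : List Int :=
  (ds.foldl (fun (p : List Int × Int) d => (p.1 ++ [p.2 + d], p.2 + d)) ([0], 0)).1

def calculate_grid_height_width_alt (lines : List (List String)) : List Int :=
  let deltas := lines.map pvDelta
  let heights := pvTraj (deltas.map Prod.fst)
  let widths := pvTraj (deltas.map Prod.snd)
  let min_h := (PySem.List.min? heights (fun x => x)).getD 0
  let max_h := (PySem.List.max? heights (fun x => x)).getD 0
  let min_w := (PySem.List.min? widths (fun x => x)).getD 0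
  let max_w := (PySem.List.max? widths (fun x => x)).getD 0
  [max_h - min_h + 1, max_w - min_w + 1, -min_h, -min_w]

-- ===== PRECONDITION & SPEC =====
-- Pre_ excludes exactly the inputs where A raises: a line that is not a two-element
-- [direction, value] pair (unpacking raises ValueError), or a line whose direction is one of
-- U/D/R/L but whose value int() cannot parse (ValueError).
def Pre_calculate_grid_height_width (lines : List (List String)) : Prop :=
  (lines.all (fun line =>
    match line with
    | [d, v] => (!(d == "U" || d == "D" || d == "R" || d == "L")) || (PySem.Int.ofStr? v).isSome
    | _ => false)) = true
instance (lines : List (List String)) : Decidable (Pre_calculate_grid_height_width lines) := by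
  unfold Pre_calculate_grid_height_width; infer_instance

def pvWitness_calculate_grid_height_width : List (List String) :=
  [["U", "3"], ["R", " 2 "], ["X", "zz"], ["D", "+1"]]

def Spec_calculate_grid_height_width (lines : List (List String)) (out : List Int) : Prop := out = calculate_grid_height_width_alt lines
instance (lines : List (List String)) (out : List Int) : Decidable (Spec_calculate_grid_height_width lines out) := by unfold Spec_calculate_grid_height_width; infer_instance

-- ===== CLAIM (what is proved, stated in full; the proofs are below) =====
def Claim_equal_calculate_grid_height_width : Prop := ∀ (lines : List (List String)), Dom_calculate_grid_height_width lines → Pre_calculate_grid_height_width lines → Spec_calculate_grid_height_width lines (calculate_grid_height_width lines)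

-- ===== LEMMAS AND PROOFS =====

-- the abstract step over a delta pair that both programs refine
def pvStepD (st : Int × Int × Int × Int × Int × Int) (d : Int × Int) :
    Int × Int × Int × Int × Int × Int :=
  match st, d with
  | (ch, mnh, mxh, cw, mnw, mxw), (dh, dw) =>
    (ch + dh, min mnh (ch + dh), max mxh (ch + dh), cw + dw, min mnw (cw + dw), max mxw (cw + dw))

-- positions reached after each step, starting (exclusive) from c
def pvPos (c : Int) : List Int → List Int
  | [] => []
  | d :: ds => (c + d) :: pvPos (c + d) ds

theorem pvStepA_eq_stepD (st : Int × Int × Int × Int × Int × Int) (d v : String) :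
    pvStepA st [d, v] = pvStepD st (pvDelta [d, v]) := by
  obtain ⟨ch, mnh, mxh, cw, mnw, mxw⟩ := st
  simp only [pvStepA, pvDelta, pvStepD]
  split_ifs <;> simp [sub_eq_add_neg]

theorem pv_foldA_eq_foldD (lines : List (List String))
    (h : Pre_calculate_grid_height_width lines) (st : Int × Int × Int × Int × Int × Int) :
    lines.foldl pvStepA st = (lines.map pvDelta).foldl pvStepD st := by
  induction lines generalizing st with
  | nil => rfl
  | cons line rest ih =>
    simp only [Pre_calculate_grid_height_width, List.all_cons, Bool.and_eq_true] at h
    obtain ⟨hl, hr⟩ := h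
    simp only [List.foldl_cons, List.map_cons]
    rw [ih hr]
    congr 1
    match line, hl with
    | [d, v], _ => exact pvStepA_eq_stepD st d v

theorem pv_foldD_spec (ds : List (Int × Int)) (ch mnh mxh cw mnw mxw : Int) :
    ds.foldl pvStepD (ch, mnh, mxh, cw, mnw, mxw) =
      (ch + (ds.map Prod.fst).sum,
       (pvPos ch (ds.map Prod.fst)).foldl min mnh,
       (pvPos ch (ds.map Prod.fst)).foldl max mxh,
       cw + (ds.map Prod.snd).sum,
       (pvPos cw (ds.map Prod.snd)).foldl min mnw,
       (pvPos cw (ds.map Prod.snd)).foldl max mxw) := by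
  induction ds generalizing ch mnh mxh cw mnw mxw with
  | nil => simp [pvPos]
  | cons d ds ih =>
    obtain ⟨dh, dw⟩ := d
    simp only [List.foldl_cons, List.map_cons, pvStepD, pvPos, List.sum_cons, ih, Prod.mk.injEq]
    and_intros <;> first | ring | trivial

theorem pvTraj_fold (ds : List Int) (acc : List Int) (c : Int) :
    ds.foldl (fun (p : List Int × Int) d => (p.1 ++ [p.2 + d], p.2 + d)) (acc, c) =
      (acc ++ pvPos c ds, c + ds.sum) := by
  induction ds generalizing acc c with
  | nil => simp [pvPos]
  | cons d ds ih =>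
    simp only [List.foldl_cons, ih, pvPos, List.sum_cons, Prod.mk.injEq]
    exact ⟨by simp, by ring⟩

theorem pvTraj_eq (ds : List Int) : pvTraj ds = 0 :: pvPos 0 ds := by
  simp [pvTraj, pvTraj_fold]

-- ===== VERDICT (by name: the statement is the Claim_ definition above) =====
theorem calculate_grid_height_width_spec : Claim_equal_calculate_grid_height_width := by
  intro lines _ hpre
  unfold Spec_calculate_grid_height_width
  unfold calculate_grid_height_width calculate_grid_height_width_alt
  rw [pv_foldA_eq_foldD lines hpre, pv_foldD_spec]
  simp [pvTraj_eq, PySem.List.min?_id_cons, PySem.List.max?_id_cons]
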